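-- pv_equiv track=rewrite | github.com/ChrisWenChen/entanglement-entropy-tutorial | lattices/subsystems.py | subsystem_left_half
-- ===== SOURCE A (Python) =====
-- def subsystem_left_half(Lx, Ly, sites_per_cell=1):
--     """Return site indices for the left half of a lattice (x < Lx/2).
--
--     This is the standard "cylinder cut" used for studying area laws.
--
--     Parameters
--     ----------
--     Lx, Ly : int
--         Lattice dimensions in unit cells.
--     sites_per_cell : int, optional
--         Number of sites per unit cell (1 for square, 2 for honeycomb).
--
--     Returns
--     -------
--     sub : list of int
--         Site indices belonging to the left half (x < Lx//2).
--
--     Notes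
--     -----
--     The boundary length is |∂A| = Ly * sites_per_cell.
--     For the square lattice: |∂A| = Ly.
--     For the honeycomb lattice: |∂A| = 2 * Ly (since each cell has 2 sites).
--     """
--     sub = []
--     for x in range(Lx // 2):
--         for y in range(Ly):
--             base = sites_per_cell * (x * Ly + y)
--             for s in range(sites_per_cell):
--                 sub.append(base + s)
--     return sub
-- ===== SOURCE B (Python) =====
-- def subsystem_left_half(Lx, Ly, sites_per_cell=1):
--     """Left-half site indices form the contiguous block 0..N-1 (each loop
--     contributes max(count, 0) iterations), so just materialize that range."""
--     n = max(Lx // 2, 0) * max(Ly, 0) * max(sites_per_cell, 0)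
--     return list(range(n))
-- ===== Notes on version B (the rewrite author's own statement) =====
-- stated objective: simpler
-- what changed: Replaces the three nested append loops by the observation that the emitted indices are exactly the contiguous block 0..N-1 with N = max(Lx//2,0)*max(Ly,0)*max(sites_per_cell,0), returned as list(range(N)).
import Mathlib
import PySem

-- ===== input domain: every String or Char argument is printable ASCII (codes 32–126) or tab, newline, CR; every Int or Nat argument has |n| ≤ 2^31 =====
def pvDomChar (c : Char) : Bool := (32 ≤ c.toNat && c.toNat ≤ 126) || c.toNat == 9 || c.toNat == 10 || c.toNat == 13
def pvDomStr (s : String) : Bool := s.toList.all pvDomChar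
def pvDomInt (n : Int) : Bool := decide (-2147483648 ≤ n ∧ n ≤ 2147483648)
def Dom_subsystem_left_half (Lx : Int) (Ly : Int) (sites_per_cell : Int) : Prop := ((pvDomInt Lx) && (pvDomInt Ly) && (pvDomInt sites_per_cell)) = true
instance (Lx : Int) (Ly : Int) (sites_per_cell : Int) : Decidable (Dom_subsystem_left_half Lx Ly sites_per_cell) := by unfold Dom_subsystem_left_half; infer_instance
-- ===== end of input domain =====

-- B replaces A's three nested append loops by materializing the contiguous block 0..N-1 directly (objective: simpler).

-- ===== PORT A =====
def subsystem_left_half (Lx : Int) (Ly : Int) (sites_per_cell : Int) : List Int :=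
  (PySem.List.pyRange 0 (PySem.Int.floordiv Lx 2) 1).foldl (fun sub x =>
    (PySem.List.pyRange 0 Ly 1).foldl (fun sub y =>
      let base := sites_per_cell * (x * Ly + y)
      (PySem.List.pyRange 0 sites_per_cell 1).foldl (fun sub s => sub ++ [base + s]) sub) sub) []

-- ===== PORT B =====
def subsystem_left_half_alt (Lx : Int) (Ly : Int) (sites_per_cell : Int) : List Int :=
  PySem.List.pyRange 0 (max (PySem.Int.floordiv Lx 2) 0 * max Ly 0 * max sites_per_cell 0) 1

-- ===== PRECONDITION & SPEC =====
def Spec_subsystem_left_half (Lx : Int) (Ly : Int) (sites_per_cell : Int) (out : List Int) : Prop := out = subsystem_left_half_alt Lx Ly sites_per_cell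
instance (Lx : Int) (Ly : Int) (sites_per_cell : Int) (out : List Int) : Decidable (Spec_subsystem_left_half Lx Ly sites_per_cell out) := by unfold Spec_subsystem_left_half; infer_instance

-- ===== CLAIM (what is proved, stated in full; the proofs are below) =====
def Claim_equal_subsystem_left_half : Prop := ∀ (Lx : Int) (Ly : Int) (sites_per_cell : Int), Dom_subsystem_left_half Lx Ly sites_per_cell → Spec_subsystem_left_half Lx Ly sites_per_cell (subsystem_left_half Lx Ly sites_per_cell)

-- ===== LEMMAS AND PROOFS =====

-- appending one element per step is init ++ map
theorem pv_foldl_append_singleton {α β : Type} (l : List α) (g : α → β) (init : List β) :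
    l.foldl (fun acc t => acc ++ [g t]) init = init ++ l.map g := by
  induction l generalizing init with
  | nil => simp
  | cons h t ih => simp [List.foldl, ih]

-- appending a block per step is init ++ flatMap
theorem pv_foldl_append_block {α β : Type} (l : List α) (h : α → List β) (init : List β) :
    l.foldl (fun acc t => acc ++ h t) init = init ++ l.flatMap h := by
  induction l generalizing init with
  | nil => simp
  | cons a t ih => simp [List.foldl, ih]

-- the core contiguity fact over Nat ranges
theorem pv_range_flat (n m : Nat) (g : Nat → Int) :
    (List.range n).flatMap (fun x => (List.range m).map (fun j => g (x * m + j)))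
      = (List.range (n * m)).map g := by
  induction n with
  | zero => simp
  | succ k ih =>
    rw [List.range_succ, List.flatMap_append, ih, Nat.succ_mul, List.range_add]
    simp [Function.comp, List.map_map]

-- foldl respects pointwise-equal step functions
theorem pv_foldl_congr {α β : Type} (l : List α) (f g : β → α → β) (init : β)
    (h : ∀ acc x, f acc x = g acc x) : l.foldl f init = l.foldl g init := by
  induction l generalizing init with
  | nil => rfl
  | cons a t ih => simp only [List.foldl]; rw [h]; exact ih _

theorem subsystem_left_half_eq (Lx Ly spc : Int) :
    subsystem_left_half Lx Ly spc = subsystem_left_half_alt Lx Ly spc := by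
  unfold subsystem_left_half subsystem_left_half_alt
  set a : Int := PySem.Int.floordiv Lx 2 with ha
  by_cases hb : 0 < Ly
  · by_cases hc : 0 < spc
    · -- all loops can run: both sides are the block 0..A*(b*c)-1 as Ints
      obtain ⟨b, rfl⟩ := Int.eq_ofNat_of_zero_le hb.le
      obtain ⟨c, rfl⟩ := Int.eq_ofNat_of_zero_le hc.le
      rw [PySem.List.pyRange_zero a, PySem.List.pyRange_zero_nat b, PySem.List.pyRange_zero_nat c,
          PySem.List.pyRange_zero (max a 0 * max (b : Int) 0 * max (c : Int) 0)]
      rw [List.foldl_map]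
      -- collapse the middle+inner folds of A into one flatMap per x
      have mid : ∀ (x : Int) (sub : List Int),
          ((List.range b).map (fun k : Nat => (k : Int))).foldl (fun sub y =>
            ((List.range c).map (fun k : Nat => (k : Int))).foldl
              (fun sub s => sub ++ [(c : Int) * (x * (b : Int) + y) + s]) sub) sub
          = sub ++ ((List.range b).map (fun k : Nat => (k : Int))).flatMap (fun y =>
              ((List.range c).map (fun k : Nat => (k : Int))).map
                (fun s => (c : Int) * (x * (b : Int) + y) + s)) := by
        intro x sub
        rw [pv_foldl_congr _ _
              (fun sub y => sub ++ ((List.range c).map (fun k : Nat => (k : Int))).map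
                (fun s => (c : Int) * (x * (b : Int) + y) + s)) sub
              (fun acc y => pv_foldl_append_singleton _ _ acc)]
        exact pv_foldl_append_block _ _ sub
      rw [pv_foldl_congr (List.range a.toNat) _
            (fun sub (x : Nat) => sub ++ ((List.range b).map (fun k : Nat => (k : Int))).flatMap (fun y =>
              ((List.range c).map (fun k : Nat => (k : Int))).map
                (fun s => (c : Int) * ((x : Int) * (b : Int) + y) + s))) []
            (fun acc x => mid (x : Int) acc)]
      rw [pv_foldl_append_block (List.range a.toNat) _ []]
      rw [List.nil_append]
      calc (List.range a.toNat).flatMap (fun x : Nat =>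
              ((List.range b).map (fun k : Nat => (k : Int))).flatMap (fun y =>
                ((List.range c).map (fun k : Nat => (k : Int))).map
                  (fun s => (c : Int) * ((x : Int) * (b : Int) + y) + s)))
          = (List.range a.toNat).flatMap (fun x : Nat =>
              (List.range (b * c)).map (fun t => ((x * (b * c) + t : Nat) : Int))) := by
            apply List.flatMap_congr
            intro x _
            rw [List.flatMap_map]
            rw [← pv_range_flat b c (fun t => ((x * (b * c) + t : Nat) : Int))]
            apply List.flatMap_congr
            intro y _
            rw [List.map_map]
            apply List.map_congr_left
            intro s _
            show (c : Int) * ((x : Int) * (b : Int) + (y : Int)) + (s : Int)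
                = ((x * (b * c) + (y * c + s) : Nat) : Int)
            push_cast
            ring
        _ = (List.range (a.toNat * (b * c))).map (fun n : Nat => (n : Int)) :=
            pv_range_flat a.toNat (b * c) (fun n => (n : Int))
        _ = (List.range (max a 0 * max (b : Int) 0 * max (c : Int) 0).toNat).map
              (fun k : Nat => (k : Int)) := by
            congr 1
            have h1 : max a 0 = ((a.toNat : Int)) := by omega
            have h2 : max (b : Int) 0 = ((b : Int)) := by omega
            have h3 : max (c : Int) 0 = ((c : Int)) := by omega
            rw [h2, h3, h1, ← Nat.cast_mul, ← Nat.cast_mul, Int.toNat_natCast, Nat.mul_assoc]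
    · -- sites_per_cell ≤ 0: inner loop never appends; both sides empty
      have h0 : PySem.List.pyRange 0 spc 1 = [] := PySem.List.pyRange_one_eq_nil (by omega)
      rw [h0]
      have hN : max a 0 * max Ly 0 * max spc 0 = 0 := by
        have : max spc 0 = 0 := by omega
        rw [this, mul_zero]
      rw [hN, PySem.List.pyRange_one_eq_nil le_rfl]
      simp [List.foldl]
  · -- Ly ≤ 0: middle loop never runs; both sides empty
    have h0 : PySem.List.pyRange 0 Ly 1 = [] := PySem.List.pyRange_one_eq_nil (by omega)
    rw [h0]
    have hN : max a 0 * max Ly 0 * max spc 0 = 0 := by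
      have : max Ly 0 = 0 := by omega
      rw [this, mul_zero, zero_mul]
    rw [hN, PySem.List.pyRange_one_eq_nil le_rfl]
    simp [List.foldl]

-- ===== VERDICT (by name: the statement is the Claim_ definition above) =====
theorem subsystem_left_half_spec : Claim_equal_subsystem_left_half := by
  intro Lx Ly spc _
  exact subsystem_left_half_eq Lx Ly spc
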